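-- pv_equiv track=rewrite | github.com/evilpete/secplus | secplus.py | _decode_v2_rolling
-- ===== SOURCE A (Python) =====
-- def _decode_v2_rolling(rolling1, rolling2):
--     rolling_digits = rolling2[8:] + rolling1[8:]
--     rolling_digits += rolling2[4:8] + rolling1[4:8]
--     rolling_digits += rolling2[:4] + rolling1[:4]
--
--     rolling = 0
--     for digit in rolling_digits:
--         rolling = (rolling * 3) + digit
--     if rolling >= 2**28:
--         raise ValueError("Rolling code was not in expected range")
--     return int(f"{rolling:028b}"[::-1], 2)
-- ===== SOURCE B (Python) =====
-- def _decode_v2_rolling(rolling1, rolling2):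
--     rolling = 0
--     for part in (rolling2[8:], rolling1[8:], rolling2[4:8], rolling1[4:8],
--                  rolling2[:4], rolling1[:4]):
--         for digit in part:
--             rolling = rolling * 3 + digit
--     if rolling >= 2**28:
--         raise ValueError("Rolling code was not in expected range")
--     result = 0
--     for _ in range(28):
--         result = result * 2 + (rolling % 2)
--         rolling //= 2
--     return result
-- ===== Notes on version B (the rewrite author's own statement) =====
-- stated objective: idiomatic
-- what changed: B never materialises the reordered rolling_digits list (it Horner-accumulates directly over the six slices) and replaces the format-string/reverse/int-parse bit reversal with a 28-iteration arithmetic bit loop (result = result*2 + rolling%2; rolling //= 2).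
import Mathlib
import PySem

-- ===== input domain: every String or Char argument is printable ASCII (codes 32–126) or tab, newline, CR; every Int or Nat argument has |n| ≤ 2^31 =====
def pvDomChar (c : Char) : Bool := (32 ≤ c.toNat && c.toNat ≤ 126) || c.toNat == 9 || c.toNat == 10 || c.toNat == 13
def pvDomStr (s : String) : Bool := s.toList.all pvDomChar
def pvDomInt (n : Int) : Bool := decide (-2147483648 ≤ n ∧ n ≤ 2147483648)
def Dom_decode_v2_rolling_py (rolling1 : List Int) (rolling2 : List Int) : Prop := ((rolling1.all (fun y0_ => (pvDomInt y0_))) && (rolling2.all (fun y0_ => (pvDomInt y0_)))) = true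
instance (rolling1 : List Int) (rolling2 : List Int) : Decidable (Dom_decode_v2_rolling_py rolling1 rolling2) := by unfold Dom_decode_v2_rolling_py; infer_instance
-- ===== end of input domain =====

-- B avoids building the reordered digit list (it Horner-accumulates over the six slices directly)
-- and replaces A's format-string/reverse/int-parse bit reversal with a 28-step arithmetic bit loop;
-- objective: more idiomatic, same cost.

-- ===== PORT A =====
def decode_v2_rolling_py (rolling1 : List Int) (rolling2 : List Int) : Int :=
  let rolling_digits :=
    (PySem.List.slice rolling2 (some 8) none ++ PySem.List.slice rolling1 (some 8) none)
    ++ (PySem.List.slice rolling2 (some 4) (some 8) ++ PySem.List.slice rolling1 (some 4) (some 8))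
    ++ (PySem.List.slice rolling2 none (some 4) ++ PySem.List.slice rolling1 none (some 4))
  let rolling := rolling_digits.foldl (fun r digit => r * 3 + digit) 0
  if rolling ≥ 2 ^ 28 then 0  -- raise ValueError("Rolling code was not in expected range"): outside Pre_
  else
    -- f"{rolling:028b}": 28 binary chars, MSB first — exact for 0 ≤ rolling < 2^28 (Pre_ guarantees
    -- this; for rolling < 0 Python's int(·, 2) of the reversed string raises ValueError, outside Pre_)
    let s : List Char := (List.range 28).map fun i =>
      if PySem.Int.mod (PySem.Int.floordiv rolling (2 ^ (27 - i))) 2 == 1 then '1' else '0'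
    -- [::-1], then int(·, 2)
    s.reverse.foldl (fun acc c => acc * 2 + (if c == '1' then (1 : Int) else 0)) 0

-- ===== PORT B =====
def decode_v2_rolling_py_alt (rolling1 : List Int) (rolling2 : List Int) : Int :=
  let horner := fun (acc : Int) (part : List Int) => part.foldl (fun a d => a * 3 + d) acc
  let rolling :=
    horner (horner (horner (horner (horner (horner 0
      (PySem.List.slice rolling2 (some 8) none)) (PySem.List.slice rolling1 (some 8) none))
      (PySem.List.slice rolling2 (some 4) (some 8))) (PySem.List.slice rolling1 (some 4) (some 8)))
      (PySem.List.slice rolling2 none (some 4))) (PySem.List.slice rolling1 none (some 4))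
  if rolling ≥ 2 ^ 28 then 0  -- raise ValueError("Rolling code was not in expected range"): outside Pre_
  else
    ((List.range 28).foldl
      (fun (st : Int × Int) _ => (st.1 * 2 + PySem.Int.mod st.2 2, PySem.Int.floordiv st.2 2))
      (0, rolling)).1

-- ===== PRECONDITION & SPEC =====
-- the base-3 value A accumulates from the reordered slices (used only to state Pre_)
def pvRollingVal (rolling1 : List Int) (rolling2 : List Int) : Int :=
  (PySem.List.slice rolling2 (some 8) none ++ PySem.List.slice rolling1 (some 8) none
    ++ PySem.List.slice rolling2 (some 4) (some 8) ++ PySem.List.slice rolling1 (some 4) (some 8)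
    ++ PySem.List.slice rolling2 none (some 4) ++ PySem.List.slice rolling1 none (some 4)).foldl
    (fun r d => r * 3 + d) 0

-- Pre_ is exactly A's success condition: A raises ValueError when the value is ≥ 2^28 (explicit check)
-- or negative (int(·, 2) cannot parse the reversed binary string of a negative number).
def Pre_decode_v2_rolling_py (rolling1 : List Int) (rolling2 : List Int) : Prop :=
  0 ≤ pvRollingVal rolling1 rolling2 ∧ pvRollingVal rolling1 rolling2 < 2 ^ 28
instance (rolling1 : List Int) (rolling2 : List Int) : Decidable (Pre_decode_v2_rolling_py rolling1 rolling2) := by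
  unfold Pre_decode_v2_rolling_py; infer_instance

def pvWitness_decode_v2_rolling_py : List Int × List Int :=
  ([0, 1, 2, 0, 1, 2, 0, 1, 2], [2, 1, 0, 2, 1, 0, 2, 1, 0])

def Spec_decode_v2_rolling_py (rolling1 : List Int) (rolling2 : List Int) (out : Int) : Prop := out = decode_v2_rolling_py_alt rolling1 rolling2
instance (rolling1 : List Int) (rolling2 : List Int) (out : Int) : Decidable (Spec_decode_v2_rolling_py rolling1 rolling2 out) := by unfold Spec_decode_v2_rolling_py; infer_instance

-- ===== CLAIM (what is proved, stated in full; the proofs are below) =====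
def Claim_equal_decode_v2_rolling_py : Prop := ∀ (rolling1 : List Int) (rolling2 : List Int), Dom_decode_v2_rolling_py rolling1 rolling2 → Pre_decode_v2_rolling_py rolling1 rolling2 → Spec_decode_v2_rolling_py rolling1 rolling2 (decode_v2_rolling_py rolling1 rolling2)

-- ===== LEMMAS AND PROOFS =====

-- a '1'/'0' digit char of A's binary string, parsed back by int(·, 2), is the bit itself
lemma pv_char_bit (x : Int) :
    (if (if PySem.Int.mod x 2 == 1 then '1' else '0') == '1' then (1 : Int) else 0) = x % 2 := by
  rw [PySem.Int.mod_eq_emod_of_pos (by norm_num)]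
  rcases Int.emod_two_eq x with h|h <;> simp [h]

-- A's format/reverse/parse final stage equals B's 28-step bit loop, on every integer
lemma pv_fin_eq (r : Int) :
    (((List.range 28).map fun i =>
        if PySem.Int.mod (PySem.Int.floordiv r (2 ^ (27 - i))) 2 == 1 then '1' else '0').reverse.foldl
      (fun acc c => acc * 2 + (if c == '1' then (1 : Int) else 0)) 0)
    = ((List.range 28).foldl
        (fun (st : Int × Int) _ => (st.1 * 2 + PySem.Int.mod st.2 2, PySem.Int.floordiv st.2 2))
        (0, r)).1 := by
  simp only [List.range_succ, List.map_cons, List.map_nil, List.reverse_cons,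
    List.reverse_nil, List.foldl_cons, List.foldl_nil, List.nil_append,
    List.cons_append, List.range_zero,
    pv_char_bit]
  norm_num [PySem.Int.floordiv_eq_ediv_of_pos, PySem.Int.mod_eq_emod_of_pos, Int.ediv_ediv_of_nonneg]

-- ===== VERDICT (by name: the statement is the Claim_ definition above) =====
theorem decode_v2_rolling_py_spec : Claim_equal_decode_v2_rolling_py := by
  intro rolling1 rolling2 _ _
  unfold Spec_decode_v2_rolling_py decode_v2_rolling_py decode_v2_rolling_py_alt
  simp only [List.foldl_append]
  split_ifs with h
  · rfl
  · exact pv_fin_eq _
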